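-- pv_equiv track=rewrite | github.com/ads1deep/Rutgers-CompSci | OOP - Python/PA3/problem1.py | num_double_letters
-- ===== SOURCE A (Python) =====
-- def num_double_letters(astr):
--     '''counts number of double letters in input string'''
--     empty=""
--     if astr == empty or len(astr) == 1: #base case
--         return 0
--     elif len(astr) == 2:
--         if astr[0] == astr[1]: #second base case
--             return 1
--         else:
--             return 0
--     elif astr[0] != astr[1]: #take latter part
--         ret_str=astr[1:]
--         return 0 + num_double_letters(ret_str)
--     elif astr[0] == astr[1]:
--         ret_str=astr[2:]  #take letter skipping 2
--         return 1 + num_double_letters(ret_str)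
-- ===== SOURCE B (Python) =====
-- def num_double_letters(astr):
--     '''counts number of double letters in input string'''
--     count = 0
--     i = 0
--     n = len(astr)
--     while i + 1 < n:
--         if astr[i] == astr[i + 1]:
--             count += 1
--             i += 2
--         else:
--             i += 1
--     return count
-- ===== Notes on version B (the rewrite author's own statement) =====
-- stated objective: faster
-- what changed: Replaces A's recursion that copies a string slice at every step with a single index-based while loop over the original string (skip 2 on a match, else 1), removing all slice copies and the recursion.
import Mathlib
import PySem

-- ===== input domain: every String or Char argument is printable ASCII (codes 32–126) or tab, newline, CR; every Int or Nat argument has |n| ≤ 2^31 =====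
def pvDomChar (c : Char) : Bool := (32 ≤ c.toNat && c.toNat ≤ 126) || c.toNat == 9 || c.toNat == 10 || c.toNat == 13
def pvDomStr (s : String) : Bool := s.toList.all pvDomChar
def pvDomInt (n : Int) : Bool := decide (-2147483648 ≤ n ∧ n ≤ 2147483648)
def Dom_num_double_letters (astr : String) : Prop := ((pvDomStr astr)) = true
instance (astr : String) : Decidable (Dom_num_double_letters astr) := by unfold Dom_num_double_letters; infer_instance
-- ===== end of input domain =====

-- B replaces A's slice-copying recursion with a single index-based loop counting
-- non-overlapping double letters (faster in a timing run; no slice copies).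

-- ===== PORT A =====
-- A's recursion on the string, case by case in A's branch order; astr[1:] / astr[2:]
-- become the tails of the char list (exact for these nonnegative slices).
def numDLRecA : List Char → Int
  | [] => 0
  | [_] => 0
  | [a, b] => if a = b then 1 else 0
  | a :: b :: c :: rest =>
      if a ≠ b then 0 + numDLRecA (b :: c :: rest)
      else 1 + numDLRecA (c :: rest)

def num_double_letters (astr : String) : Int := numDLRecA astr.toList

-- ===== PORT B =====
-- B's while loop: index i over the fixed char list, skip 2 on a match else 1.
def numDLLoopB (s : List Char) (i : Nat) (count : Int) : Int :=
  if h : i + 1 < s.length then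
    if s[i] = s[i + 1] then numDLLoopB s (i + 2) (count + 1)
    else numDLLoopB s (i + 1) count
  else count
termination_by s.length - i

def num_double_letters_alt (astr : String) : Int := numDLLoopB astr.toList 0 0

-- ===== PRECONDITION & SPEC =====
def Spec_num_double_letters (astr : String) (out : Int) : Prop := out = num_double_letters_alt astr
instance (astr : String) (out : Int) : Decidable (Spec_num_double_letters astr out) := by unfold Spec_num_double_letters; infer_instance

-- ===== CLAIM (what is proved, stated in full; the proofs are below) =====
def Claim_equal_num_double_letters : Prop := ∀ (astr : String), Dom_num_double_letters astr → Spec_num_double_letters astr (num_double_letters astr)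

-- ===== LEMMAS AND PROOFS =====
theorem numDLRecA_eq (a : Char) (rest : List Char) :
    numDLRecA (a :: a :: rest) = 1 + numDLRecA rest := by
  cases rest with
  | nil => simp [numDLRecA]
  | cons c t => cases t <;> simp [numDLRecA]

theorem numDLRecA_ne (a b : Char) (rest : List Char) (h : a ≠ b) :
    numDLRecA (a :: b :: rest) = numDLRecA (b :: rest) := by
  cases rest with
  | nil => simp [numDLRecA, h]
  | cons c t => cases t <;> simp [numDLRecA, h]

theorem numDLLoopB_eq_drop (s : List Char) (i : Nat) (count : Int) :
    numDLLoopB s i count = count + numDLRecA (s.drop i) := by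
  by_cases h : i + 1 < s.length
  · have hi : i < s.length := by omega
    have hdrop : s.drop i = s[i] :: s[i+1] :: s.drop (i + 2) := by
      rw [List.drop_eq_getElem_cons hi, List.drop_eq_getElem_cons h]
    by_cases heq : s[i] = s[i+1]
    · rw [numDLLoopB]
      simp only [h, heq, dif_pos, if_pos]
      rw [numDLLoopB_eq_drop s (i + 2) (count + 1), hdrop, ← heq, numDLRecA_eq]
      ring
    · rw [numDLLoopB]
      simp only [h, heq, dif_pos, if_neg, not_false_iff]
      rw [numDLLoopB_eq_drop s (i + 1) count, hdrop,
        List.drop_eq_getElem_cons h, numDLRecA_ne _ _ _ heq]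
  · rw [numDLLoopB]
    simp only [h, dif_neg, not_false_iff]
    have : (s.drop i).length ≤ 1 := by simp; omega
    rcases hd : s.drop i with _ | ⟨x, _ | _⟩ <;> simp_all [numDLRecA]
termination_by s.length - i

-- ===== VERDICT (by name: the statement is the Claim_ definition above) =====
theorem num_double_letters_spec : Claim_equal_num_double_letters := by
  intro astr _
  unfold Spec_num_double_letters num_double_letters num_double_letters_alt
  rw [numDLLoopB_eq_drop]
  simp
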